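-- pv_equiv track=rewrite | github.com/ahmedsallu7493/F.R.I.D.A.Y-2.O- | Backend/RealTimeSearchEngine.py | answer_modifier
-- ===== SOURCE A (Python) =====
-- def answer_modifier(answer):
--     blacklist_phrases = [
--         "I'm a large language model", "Please note that", "I suggest checking",
--         "You can also search for", "reliable weather website", "Weather.com",
--         "AccuWeather", "News channel", "mobile app", "look for local news",
--         "<|header_start|>", "<|header_end|>", "Is there anything else I can help you with?",
--         "Let me know if", "I can't access real-time"
--     ]
--     stop_keywords = ["Sunset", "Volume", "Today's top news headlines are:"]
--     cleaned_lines, seen_lines = [], set()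
--     stop_triggered = False
--
--     for line in answer.splitlines():
--         stripped = line.strip()
--         if not stripped:
--             continue
--         if any(bad.lower() in stripped.lower() for bad in blacklist_phrases):
--             continue
--         if any(stripped.startswith(k) for k in stop_keywords):
--             stop_triggered = True
--             continue
--         if stop_triggered:
--             continue
--         if stripped not in seen_lines:
--             cleaned_lines.append(stripped)
--             seen_lines.add(stripped)
--
--     return "\n".join(cleaned_lines)
-- ===== SOURCE B (Python) =====
-- def answer_modifier(answer):
--     blacklist_phrases = [
--         "I'm a large language model", "Please note that", "I suggest checking",
--         "You can also search for", "reliable weather website", "Weather.com",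
--         "AccuWeather", "News channel", "mobile app", "look for local news",
--         "<|header_start|>", "<|header_end|>", "Is there anything else I can help you with?",
--         "Let me know if", "I can't access real-time"
--     ]
--     stop_keywords = ["Sunset", "Volume", "Today's top news headlines are:"]
--
--     # staged pipeline: strip & drop empties -> blacklist filter -> cut at first stop line -> ordered dedup
--     stripped_lines = [s for s in (ln.strip() for ln in answer.splitlines()) if s]
--     kept = [s for s in stripped_lines
--             if not any(bad.lower() in s.lower() for bad in blacklist_phrases)]
--     stop_idx = next((i for i, s in enumerate(kept)
--                      if any(s.startswith(k) for k in stop_keywords)), len(kept))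
--     return "\n".join(dict.fromkeys(kept[:stop_idx]))
-- ===== Notes on version B (the rewrite author's own statement) =====
-- stated objective: idiomatic
-- what changed: Replaced A's single loop with a stop flag and a seen-set by a staged pipeline: strip/drop-empty lines, filter out blacklisted lines, cut the list at the first stop-keyword line (next with enumerate instead of a mutable flag), then ordered dedup via dict.fromkeys.
import Mathlib
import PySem

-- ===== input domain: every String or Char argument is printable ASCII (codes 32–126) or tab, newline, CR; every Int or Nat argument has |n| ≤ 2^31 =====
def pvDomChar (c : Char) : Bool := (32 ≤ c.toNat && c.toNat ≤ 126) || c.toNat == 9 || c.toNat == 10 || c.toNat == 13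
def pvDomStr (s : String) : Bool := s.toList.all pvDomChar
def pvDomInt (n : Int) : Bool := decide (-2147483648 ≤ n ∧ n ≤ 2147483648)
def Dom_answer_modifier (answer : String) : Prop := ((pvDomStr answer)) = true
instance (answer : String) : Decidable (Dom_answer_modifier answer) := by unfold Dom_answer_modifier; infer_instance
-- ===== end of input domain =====

-- B replaces A's single stop-flag loop by a staged pipeline (strip/drop-empty, blacklist filter,
-- cut at first stop line, ordered dedup); objective: idiomatic decomposition, same cost.


-- ===== PORT A =====
-- the two constant phrase lists of the Python source (shared data, used by both ports)
def amBlacklist : List String :=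
  ["I'm a large language model", "Please note that", "I suggest checking",
   "You can also search for", "reliable weather website", "Weather.com",
   "AccuWeather", "News channel", "mobile app", "look for local news",
   "<|header_start|>", "<|header_end|>", "Is there anything else I can help you with?",
   "Let me know if", "I can't access real-time"]
def amStop : List String := ["Sunset", "Volume", "Today's top news headlines are:"]

-- A's loop body: state = (cleaned_lines, seen_lines, stop_triggered)
def amStep (st : List String × PySem.Set String × Bool) (line : String) :
    List String × PySem.Set String × Bool :=
  let stripped := PySem.Str.strip line
  if stripped == "" then st
  else if amBlacklist.any (fun bad => PySem.Str.isIn (PySem.Str.lower bad) (PySem.Str.lower stripped)) then st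
  else if amStop.any (fun k => PySem.Str.startswith stripped k) then (st.1, st.2.1, true)
  else if st.2.2 then st
  else if PySem.Set.contains st.2.1 stripped then st
  else (st.1 ++ [stripped], PySem.Set.add st.2.1 stripped, st.2.2)

def answer_modifier (answer : String) : String :=
  PySem.Str.join "\n"
    ((PySem.Str.splitlines answer).foldl amStep ([], PySem.Set.empty, false)).1

-- ===== PORT B =====
-- B's two filter predicates (the comprehension conditions of Source B)
def amBad (s : String) : Bool :=
  amBlacklist.any (fun bad => PySem.Str.isIn (PySem.Str.lower bad) (PySem.Str.lower s))
def amIsStop (s : String) : Bool := amStop.any (fun k => PySem.Str.startswith s k)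

def answer_modifier_alt (answer : String) : String :=
  let strippedLines := ((PySem.Str.splitlines answer).map PySem.Str.strip).filter (fun s => s != "")
  let kept := strippedLines.filter (fun s => !amBad s)
  -- next((i for i, s in enumerate(kept) if any(...)), len(kept))
  let stopIdx := (kept.findIdx? (fun s => amIsStop s)).getD kept.length
  PySem.Str.join "\n" (PySem.List.dedup (kept.take stopIdx))

-- ===== PRECONDITION & SPEC =====
def Spec_answer_modifier (answer : String) (out : String) : Prop := out = answer_modifier_alt answer
instance (answer : String) (out : String) : Decidable (Spec_answer_modifier answer out) := by unfold Spec_answer_modifier; infer_instance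

-- ===== CLAIM (what is proved, stated in full; the proofs are below) =====
def Claim_equal_answer_modifier : Prop := ∀ (answer : String), Dom_answer_modifier answer → Spec_answer_modifier answer (answer_modifier answer)

-- ===== LEMMAS AND PROOFS =====

-- A's step written with B's named predicates (definitional)
lemma amStep_eq (st : List String × PySem.Set String × Bool) (l : String) :
    amStep st l =
      (if PySem.Str.strip l == "" then st
       else if amBad (PySem.Str.strip l) then st
       else if amIsStop (PySem.Str.strip l) then (st.1, st.2.1, true)
       else if st.2.2 then st
       else if PySem.Set.contains st.2.1 (PySem.Str.strip l) then st
       else (st.1 ++ [PySem.Str.strip l], PySem.Set.add st.2.1 (PySem.Str.strip l), st.2.2)) := rfl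

-- B's 'take until the first stop index' is takeWhile of the negated test
lemma am_take_findIdx {α : Type} (p : α → Bool) (l : List α) :
    l.take ((l.findIdx? p).getD l.length) = l.takeWhile (fun x => !p x) := by
  induction l with
  | nil => rfl
  | cons x xs ih =>
    by_cases h : p x = true
    · rw [List.findIdx?_cons, if_pos h, List.takeWhile_cons_of_neg (by simp [h])]
      rfl
    · rw [List.findIdx?_cons, if_neg h, List.takeWhile_cons_of_pos (by simp [h]), ← ih]
      cases xs.findIdx? p <;> rfl

-- once stop_triggered is true, A's loop changes nothing
lemma amStep_stopped (c seen : List String) (l : String) :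
    amStep (c, seen, true) l = (c, seen, true) := by
  rw [amStep_eq]
  split_ifs with h1 h2 h3 h4 h5 <;> first | rfl | exact absurd rfl h4

lemma am_fold_stopped (ls : List String) (c seen : List String) :
    (ls.foldl amStep (c, seen, true)).1 = c := by
  induction ls with
  | nil => rfl
  | cons l ls ih => rw [List.foldl_cons, amStep_stopped]; exact ih

-- main loop invariant: with seen = cleaned, A's loop appends exactly B's deduped head
lemma am_fold_main (ls : List String) (c : List String) :
    (ls.foldl amStep (c, c, false)).1
      = PySem.Set.update c
          ((((ls.map PySem.Str.strip).filter (fun s => s != "")).filter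
              (fun s => !amBad s)).takeWhile (fun s => !amIsStop s)) := by
  induction ls generalizing c with
  | nil => rfl
  | cons l ls ih =>
    rw [List.foldl_cons, amStep_eq, List.map_cons]
    by_cases hemp : (PySem.Str.strip l == "") = true
    · rw [if_pos hemp, List.filter_cons_of_neg (by simp [String.ext_iff] at hemp ⊢; simp [hemp]),
        ih]
    · rw [if_neg hemp, List.filter_cons_of_pos (by simpa using hemp)]
      by_cases hbad : amBad (PySem.Str.strip l) = true
      · rw [if_pos hbad, List.filter_cons_of_neg (by simp [hbad]), ih]
      · rw [if_neg hbad, List.filter_cons_of_pos (by simp [hbad])]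
        by_cases hstop : amIsStop (PySem.Str.strip l) = true
        · rw [if_pos hstop, List.takeWhile_cons_of_neg (by simp [hstop])]
          exact am_fold_stopped ls c c
        · rw [if_neg hstop, List.takeWhile_cons_of_pos (by simp [hstop]),
            if_neg (by exact Bool.false_ne_true)]
          by_cases hmem : PySem.Set.contains c (PySem.Str.strip l) = true
          · rw [if_pos hmem, ih c]
            have hadd : PySem.Set.add c (PySem.Str.strip l) = c := by
              simp only [PySem.Set.add, hmem, if_true]
            show _ = List.foldl PySem.Set.add c (PySem.Str.strip l :: _)
            rw [List.foldl_cons, hadd]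
            rfl
          · rw [if_neg hmem]
            have hadd : PySem.Set.add c (PySem.Str.strip l) = c ++ [PySem.Str.strip l] := by
              simp only [PySem.Set.add, hmem, if_false, Bool.false_eq_true]
            show (List.foldl amStep (c ++ [PySem.Str.strip l], PySem.Set.add c (PySem.Str.strip l), false) ls).1 = _
            rw [hadd, ih (c ++ [PySem.Str.strip l])]
            show _ = List.foldl PySem.Set.add c (PySem.Str.strip l :: _)
            rw [List.foldl_cons, hadd]
            rfl

-- ===== VERDICT (by name: the statement is the Claim_ definition above) =====
theorem answer_modifier_spec : Claim_equal_answer_modifier := by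
  intro answer _
  show PySem.Str.join "\n" ((PySem.Str.splitlines answer).foldl amStep ([], [], false)).1
      = PySem.Str.join "\n" (PySem.List.dedup
          (((((PySem.Str.splitlines answer).map PySem.Str.strip).filter (fun s => s != "")).filter
              (fun s => !amBad s)).take
            ((((((PySem.Str.splitlines answer).map PySem.Str.strip).filter (fun s => s != "")).filter
                (fun s => !amBad s)).findIdx? (fun s => amIsStop s)).getD
              ((((PySem.Str.splitlines answer).map PySem.Str.strip).filter (fun s => s != "")).filter
                  (fun s => !amBad s)).length)))
  rw [am_take_findIdx, am_fold_main]
  rfl
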